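-- pv_equiv track=rewrite | github.com/Corposostenibile/suite-clinica | backend/scripts/migration_scripts/schema_comparator.py | get_professional_info
-- ===== SOURCE A (Python) =====
-- from collections import OrderedDict, defaultdict
--
-- OFFICIAL_TEAMS = OrderedDict({
--     '1': {
--         'name': 'Nutrizione - Team 1',
--         'team_type': 'nutrizione',
--         'leader': 'Filippo Feliciani',
--         'members': ['Alessandra Arcoleo', 'Caterina Esposito', 'Chiara Giombolini', 'Elisa Menichelli', 'Federica Cutolo', 'Giorgia Leone', 'Giorgia Santi', 'Jessica Di Colli', 'Maria Vittoria Sallicano', 'Marilena Franco', 'Marta Buccilli', 'Martina Mantovani', 'Michela Pagnani', 'Sara Goffi', 'Valeria Loliva'],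
--     },
--     '2': {
--         'name': 'Nutrizione - Team 2',
--         'team_type': 'nutrizione',
--         'leader': 'Isabella Rossi',
--         'members': ['Alice Aresti', 'Alice Surbone', 'Florinda Masciello', 'Francesca Abatini', 'Gianluca Marino', 'Gianna Sannelli', 'Isabella Venticinque', 'Mara Adreola', 'Marisa Piras', 'Martina Roberti', 'Nicola Fassetta', 'Nicolò Lorenzo Marinelli', 'Rossana Picerno', 'Silvia Testoni', 'Virginia Vitelli'],
--     },
--     '3': {
--         'name': 'Nutrizione - Team 3',
--         'team_type': 'nutrizione',
--         'leader': 'Alice Posenato',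
--         'members': ['Andrea Tuacris', 'Bianca Balzarini', 'Caterina Scarano', 'Chiara D\'Addesa', 'Elisa Mancini', 'Francesca Ceppetelli', 'Francesca Tornese', 'Giammarco Lamanda', 'Rossella Cariglia', 'Sabine Ardiccioni', 'Silvia Maria Scoletta', 'Valentina Botondi'],
--     },
--     '4': {
--         'name': 'Nutrizione - Team 4',
--         'team_type': 'nutrizione',
--         'leader': 'Alice Posenato',
--         'members': ['Carlotta Sed', 'Francesca Valentini', 'Gaia Sala', 'Marta Bendusi', 'Noemi Di Natale', 'Virginia Bonazzi'],
--     },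
--     '5': {
--         'name': 'Psicologia - Team 1',
--         'team_type': 'psicologia',
--         'leader': 'Delia De Santis',
--         'members': ['Alice Lampone', 'Angela Velletri', 'Claudia Milione', 'Giorgia Del Bianco', 'Martina Calvi', 'Martina Loccisano'],
--     },
--     '6': {
--         'name': 'Psicologia - Team 2',
--         'team_type': 'psicologia',
--         'leader': 'Francesca Zaccaro',
--         'members': ['Angel Disney Armenise', 'Aurora Valente', 'Barbara Visalli', 'Denise Caravano', 'Germana Morganti', 'Manny Aiello'],
--     },
--     '7': {
--         'name': 'Coach',
--         'team_type': 'coach',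
--         'leader': 'Lorenzo Sambri',
--         'members': ['Alessandra Di Lisciandro', 'Angbonon Ange Olivier Bile', 'Angelo Lacorte', 'Claudio Lopiano', 'Danilo Bonifati', 'Federico De Bene', 'Francesco Falcone', 'Giovanna Pirina', 'Giuseppe Summa', 'Ilaria Galesi', 'Marco Fratini', 'Matteo Test User', 'Nino Helera', 'Rebecca Masseroni', 'Ruggiero Balzano', 'Sara Paganotto', 'Valentina Carisio'],
--     },
-- })
--
-- def get_professional_info(first_name, last_name):
--     full_name = f"{first_name} {last_name}".strip().lower()
--     for team in OFFICIAL_TEAMS.values():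
--         specialty = team['team_type']
--         spec_map = {'nutrizione': 'nutrizionista', 'psicologia': 'psicologo', 'coach': 'coach'}
--         if team['leader'].lower() == full_name:
--             return spec_map[specialty], 'team_leader'
--         if any(m.lower() == full_name for m in team['members']):
--             return spec_map[specialty], 'professionista'
--     return None, None
-- ===== SOURCE B (Python) =====
-- # Flat precomputed lookup table: lowercase full name -> (label, role).
-- # One dict lookup per call; priority (team order, leader before member, first
-- # occurrence wins) is already baked into the table, matching the original scan.
-- NAME_INDEX = {
--     'filippo feliciani': ('nutrizionista', 'team_leader'),
--     'alessandra arcoleo': ('nutrizionista', 'professionista'),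
--     'caterina esposito': ('nutrizionista', 'professionista'),
--     'chiara giombolini': ('nutrizionista', 'professionista'),
--     'elisa menichelli': ('nutrizionista', 'professionista'),
--     'federica cutolo': ('nutrizionista', 'professionista'),
--     'giorgia leone': ('nutrizionista', 'professionista'),
--     'giorgia santi': ('nutrizionista', 'professionista'),
--     'jessica di colli': ('nutrizionista', 'professionista'),
--     'maria vittoria sallicano': ('nutrizionista', 'professionista'),
--     'marilena franco': ('nutrizionista', 'professionista'),
--     'marta buccilli': ('nutrizionista', 'professionista'),
--     'martina mantovani': ('nutrizionista', 'professionista'),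
--     'michela pagnani': ('nutrizionista', 'professionista'),
--     'sara goffi': ('nutrizionista', 'professionista'),
--     'valeria loliva': ('nutrizionista', 'professionista'),
--     'isabella rossi': ('nutrizionista', 'team_leader'),
--     'alice aresti': ('nutrizionista', 'professionista'),
--     'alice surbone': ('nutrizionista', 'professionista'),
--     'florinda masciello': ('nutrizionista', 'professionista'),
--     'francesca abatini': ('nutrizionista', 'professionista'),
--     'gianluca marino': ('nutrizionista', 'professionista'),
--     'gianna sannelli': ('nutrizionista', 'professionista'),
--     'isabella venticinque': ('nutrizionista', 'professionista'),
--     'mara adreola': ('nutrizionista', 'professionista'),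
--     'marisa piras': ('nutrizionista', 'professionista'),
--     'martina roberti': ('nutrizionista', 'professionista'),
--     'nicola fassetta': ('nutrizionista', 'professionista'),
--     'nicolò lorenzo marinelli': ('nutrizionista', 'professionista'),
--     'rossana picerno': ('nutrizionista', 'professionista'),
--     'silvia testoni': ('nutrizionista', 'professionista'),
--     'virginia vitelli': ('nutrizionista', 'professionista'),
--     'alice posenato': ('nutrizionista', 'team_leader'),
--     'andrea tuacris': ('nutrizionista', 'professionista'),
--     'bianca balzarini': ('nutrizionista', 'professionista'),
--     'caterina scarano': ('nutrizionista', 'professionista'),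
--     "chiara d'addesa": ('nutrizionista', 'professionista'),
--     'elisa mancini': ('nutrizionista', 'professionista'),
--     'francesca ceppetelli': ('nutrizionista', 'professionista'),
--     'francesca tornese': ('nutrizionista', 'professionista'),
--     'giammarco lamanda': ('nutrizionista', 'professionista'),
--     'rossella cariglia': ('nutrizionista', 'professionista'),
--     'sabine ardiccioni': ('nutrizionista', 'professionista'),
--     'silvia maria scoletta': ('nutrizionista', 'professionista'),
--     'valentina botondi': ('nutrizionista', 'professionista'),
--     'carlotta sed': ('nutrizionista', 'professionista'),
--     'francesca valentini': ('nutrizionista', 'professionista'),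
--     'gaia sala': ('nutrizionista', 'professionista'),
--     'marta bendusi': ('nutrizionista', 'professionista'),
--     'noemi di natale': ('nutrizionista', 'professionista'),
--     'virginia bonazzi': ('nutrizionista', 'professionista'),
--     'delia de santis': ('psicologo', 'team_leader'),
--     'alice lampone': ('psicologo', 'professionista'),
--     'angela velletri': ('psicologo', 'professionista'),
--     'claudia milione': ('psicologo', 'professionista'),
--     'giorgia del bianco': ('psicologo', 'professionista'),
--     'martina calvi': ('psicologo', 'professionista'),
--     'martina loccisano': ('psicologo', 'professionista'),
--     'francesca zaccaro': ('psicologo', 'team_leader'),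
--     'angel disney armenise': ('psicologo', 'professionista'),
--     'aurora valente': ('psicologo', 'professionista'),
--     'barbara visalli': ('psicologo', 'professionista'),
--     'denise caravano': ('psicologo', 'professionista'),
--     'germana morganti': ('psicologo', 'professionista'),
--     'manny aiello': ('psicologo', 'professionista'),
--     'lorenzo sambri': ('coach', 'team_leader'),
--     'alessandra di lisciandro': ('coach', 'professionista'),
--     'angbonon ange olivier bile': ('coach', 'professionista'),
--     'angelo lacorte': ('coach', 'professionista'),
--     'claudio lopiano': ('coach', 'professionista'),
--     'danilo bonifati': ('coach', 'professionista'),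
--     'federico de bene': ('coach', 'professionista'),
--     'francesco falcone': ('coach', 'professionista'),
--     'giovanna pirina': ('coach', 'professionista'),
--     'giuseppe summa': ('coach', 'professionista'),
--     'ilaria galesi': ('coach', 'professionista'),
--     'marco fratini': ('coach', 'professionista'),
--     'matteo test user': ('coach', 'professionista'),
--     'nino helera': ('coach', 'professionista'),
--     'rebecca masseroni': ('coach', 'professionista'),
--     'ruggiero balzano': ('coach', 'professionista'),
--     'sara paganotto': ('coach', 'professionista'),
--     'valentina carisio': ('coach', 'professionista'),
-- }
--
-- def get_professional_info(first_name, last_name):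
--     full_name = f"{first_name} {last_name}".strip().lower()
--     return NAME_INDEX.get(full_name, (None, None))
-- ===== Notes on version B (the rewrite author's own statement) =====
-- stated objective: alternative
-- what changed: Replaces the per-call scan over all teams, leaders and member lists with a flat precomputed table (lowercase full name -> (label, role), the scan's team-order/leader-first/first-wins priority baked in) queried by a single dict lookup.
import Mathlib
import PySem

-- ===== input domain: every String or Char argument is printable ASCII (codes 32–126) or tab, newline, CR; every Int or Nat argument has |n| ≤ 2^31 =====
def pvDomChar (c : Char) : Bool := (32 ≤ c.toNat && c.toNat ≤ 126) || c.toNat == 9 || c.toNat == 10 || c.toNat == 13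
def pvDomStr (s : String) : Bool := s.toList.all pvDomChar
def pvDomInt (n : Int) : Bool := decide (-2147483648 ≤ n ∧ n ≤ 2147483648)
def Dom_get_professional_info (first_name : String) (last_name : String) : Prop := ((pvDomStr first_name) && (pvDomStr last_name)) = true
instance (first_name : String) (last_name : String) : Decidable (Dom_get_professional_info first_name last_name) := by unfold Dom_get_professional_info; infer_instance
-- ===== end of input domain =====

-- B replaces A's per-call scan over every team with a flat precomputed table
-- (lowercase full name → (label, role), first occurrence wins) queried by one
-- dict lookup; objective: alternative (table lookup instead of a scan).

-- ===== PORT A =====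
-- OFFICIAL_TEAMS.values() in order: (team_type, leader, members)
def pvTeams : List (String × String × List String) :=
  [("nutrizione", "Filippo Feliciani",
    ["Alessandra Arcoleo", "Caterina Esposito", "Chiara Giombolini", "Elisa Menichelli", "Federica Cutolo", "Giorgia Leone", "Giorgia Santi", "Jessica Di Colli", "Maria Vittoria Sallicano", "Marilena Franco", "Marta Buccilli", "Martina Mantovani", "Michela Pagnani", "Sara Goffi", "Valeria Loliva"]),
   ("nutrizione", "Isabella Rossi",
    ["Alice Aresti", "Alice Surbone", "Florinda Masciello", "Francesca Abatini", "Gianluca Marino", "Gianna Sannelli", "Isabella Venticinque", "Mara Adreola", "Marisa Piras", "Martina Roberti", "Nicola Fassetta", "Nicolò Lorenzo Marinelli", "Rossana Picerno", "Silvia Testoni", "Virginia Vitelli"]),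
   ("nutrizione", "Alice Posenato",
    ["Andrea Tuacris", "Bianca Balzarini", "Caterina Scarano", "Chiara D'Addesa", "Elisa Mancini", "Francesca Ceppetelli", "Francesca Tornese", "Giammarco Lamanda", "Rossella Cariglia", "Sabine Ardiccioni", "Silvia Maria Scoletta", "Valentina Botondi"]),
   ("nutrizione", "Alice Posenato",
    ["Carlotta Sed", "Francesca Valentini", "Gaia Sala", "Marta Bendusi", "Noemi Di Natale", "Virginia Bonazzi"]),
   ("psicologia", "Delia De Santis",
    ["Alice Lampone", "Angela Velletri", "Claudia Milione", "Giorgia Del Bianco", "Martina Calvi", "Martina Loccisano"]),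
   ("psicologia", "Francesca Zaccaro",
    ["Angel Disney Armenise", "Aurora Valente", "Barbara Visalli", "Denise Caravano", "Germana Morganti", "Manny Aiello"]),
   ("coach", "Lorenzo Sambri",
    ["Alessandra Di Lisciandro", "Angbonon Ange Olivier Bile", "Angelo Lacorte", "Claudio Lopiano", "Danilo Bonifati", "Federico De Bene", "Francesco Falcone", "Giovanna Pirina", "Giuseppe Summa", "Ilaria Galesi", "Marco Fratini", "Matteo Test User", "Nino Helera", "Rebecca Masseroni", "Ruggiero Balzano", "Sara Paganotto", "Valentina Carisio"])]

def pvSpecMap : PySem.Dict String String :=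
  PySem.Dict.ofList [("nutrizione", "nutrizionista"), ("psicologia", "psicologo"), ("coach", "coach")]

-- A's for-loop with early returns, as structural recursion over OFFICIAL_TEAMS.values().
-- spec_map[specialty]: every team_type is a key of pvSpecMap on this data, so the KeyError
-- branch is unreachable and .getD "" is exact.
def pvScanA (full : String) : List (String × String × List String) → Option String × Option String
  | [] => (none, none)
  | (tt, leader, members) :: rest =>
    let label := (pvSpecMap.get? tt).getD ""
    if PySem.Str.lower leader == full then (some label, some "team_leader")
    else if members.any (fun m => PySem.Str.lower m == full) then (some label, some "professionista")
    else pvScanA full rest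

def get_professional_info (first_name : String) (last_name : String) : Option String × Option String :=
  pvScanA (PySem.Str.lower (PySem.Str.strip (first_name ++ " " ++ last_name))) pvTeams

-- ===== PORT B =====
-- Source B's literal NAME_INDEX dict: lowercase full name → (label, role)
def pvNameIndex : PySem.Dict String (String × String) :=
  PySem.Dict.ofList
  [   ("filippo feliciani", ("nutrizionista", "team_leader")),
   ("alessandra arcoleo", ("nutrizionista", "professionista")),
   ("caterina esposito", ("nutrizionista", "professionista")),
   ("chiara giombolini", ("nutrizionista", "professionista")),
   ("elisa menichelli", ("nutrizionista", "professionista")),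
   ("federica cutolo", ("nutrizionista", "professionista")),
   ("giorgia leone", ("nutrizionista", "professionista")),
   ("giorgia santi", ("nutrizionista", "professionista")),
   ("jessica di colli", ("nutrizionista", "professionista")),
   ("maria vittoria sallicano", ("nutrizionista", "professionista")),
   ("marilena franco", ("nutrizionista", "professionista")),
   ("marta buccilli", ("nutrizionista", "professionista")),
   ("martina mantovani", ("nutrizionista", "professionista")),
   ("michela pagnani", ("nutrizionista", "professionista")),
   ("sara goffi", ("nutrizionista", "professionista")),
   ("valeria loliva", ("nutrizionista", "professionista")),
   ("isabella rossi", ("nutrizionista", "team_leader")),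
   ("alice aresti", ("nutrizionista", "professionista")),
   ("alice surbone", ("nutrizionista", "professionista")),
   ("florinda masciello", ("nutrizionista", "professionista")),
   ("francesca abatini", ("nutrizionista", "professionista")),
   ("gianluca marino", ("nutrizionista", "professionista")),
   ("gianna sannelli", ("nutrizionista", "professionista")),
   ("isabella venticinque", ("nutrizionista", "professionista")),
   ("mara adreola", ("nutrizionista", "professionista")),
   ("marisa piras", ("nutrizionista", "professionista")),
   ("martina roberti", ("nutrizionista", "professionista")),
   ("nicola fassetta", ("nutrizionista", "professionista")),
   ("nicolò lorenzo marinelli", ("nutrizionista", "professionista")),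
   ("rossana picerno", ("nutrizionista", "professionista")),
   ("silvia testoni", ("nutrizionista", "professionista")),
   ("virginia vitelli", ("nutrizionista", "professionista")),
   ("alice posenato", ("nutrizionista", "team_leader")),
   ("andrea tuacris", ("nutrizionista", "professionista")),
   ("bianca balzarini", ("nutrizionista", "professionista")),
   ("caterina scarano", ("nutrizionista", "professionista")),
   ("chiara d'addesa", ("nutrizionista", "professionista")),
   ("elisa mancini", ("nutrizionista", "professionista")),
   ("francesca ceppetelli", ("nutrizionista", "professionista")),
   ("francesca tornese", ("nutrizionista", "professionista")),
   ("giammarco lamanda", ("nutrizionista", "professionista")),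
   ("rossella cariglia", ("nutrizionista", "professionista")),
   ("sabine ardiccioni", ("nutrizionista", "professionista")),
   ("silvia maria scoletta", ("nutrizionista", "professionista")),
   ("valentina botondi", ("nutrizionista", "professionista")),
   ("carlotta sed", ("nutrizionista", "professionista")),
   ("francesca valentini", ("nutrizionista", "professionista")),
   ("gaia sala", ("nutrizionista", "professionista")),
   ("marta bendusi", ("nutrizionista", "professionista")),
   ("noemi di natale", ("nutrizionista", "professionista")),
   ("virginia bonazzi", ("nutrizionista", "professionista")),
   ("delia de santis", ("psicologo", "team_leader")),
   ("alice lampone", ("psicologo", "professionista")),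
   ("angela velletri", ("psicologo", "professionista")),
   ("claudia milione", ("psicologo", "professionista")),
   ("giorgia del bianco", ("psicologo", "professionista")),
   ("martina calvi", ("psicologo", "professionista")),
   ("martina loccisano", ("psicologo", "professionista")),
   ("francesca zaccaro", ("psicologo", "team_leader")),
   ("angel disney armenise", ("psicologo", "professionista")),
   ("aurora valente", ("psicologo", "professionista")),
   ("barbara visalli", ("psicologo", "professionista")),
   ("denise caravano", ("psicologo", "professionista")),
   ("germana morganti", ("psicologo", "professionista")),
   ("manny aiello", ("psicologo", "professionista")),
   ("lorenzo sambri", ("coach", "team_leader")),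
   ("alessandra di lisciandro", ("coach", "professionista")),
   ("angbonon ange olivier bile", ("coach", "professionista")),
   ("angelo lacorte", ("coach", "professionista")),
   ("claudio lopiano", ("coach", "professionista")),
   ("danilo bonifati", ("coach", "professionista")),
   ("federico de bene", ("coach", "professionista")),
   ("francesco falcone", ("coach", "professionista")),
   ("giovanna pirina", ("coach", "professionista")),
   ("giuseppe summa", ("coach", "professionista")),
   ("ilaria galesi", ("coach", "professionista")),
   ("marco fratini", ("coach", "professionista")),
   ("matteo test user", ("coach", "professionista")),
   ("nino helera", ("coach", "professionista")),
   ("rebecca masseroni", ("coach", "professionista")),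
   ("ruggiero balzano", ("coach", "professionista")),
   ("sara paganotto", ("coach", "professionista")),
   ("valentina carisio", ("coach", "professionista"))]

-- NAME_INDEX.get(full_name, (None, None)); found values are pairs of strings,
-- so under the Option typing they come back as (some label, some role).
def get_professional_info_alt (first_name : String) (last_name : String) : Option String × Option String :=
  match pvNameIndex.get? (PySem.Str.lower (PySem.Str.strip (first_name ++ " " ++ last_name))) with
  | some (s, r) => (some s, some r)
  | none => (none, none)

-- ===== PRECONDITION & SPEC =====
def Spec_get_professional_info (first_name : String) (last_name : String) (out : Option String × Option String) : Prop := out = get_professional_info_alt first_name last_name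
instance (first_name : String) (last_name : String) (out : Option String × Option String) : Decidable (Spec_get_professional_info first_name last_name out) := by unfold Spec_get_professional_info; infer_instance

-- ===== CLAIM =====
def Claim_equal_get_professional_info : Prop := ∀ (first_name : String) (last_name : String), Dom_get_professional_info first_name last_name → Spec_get_professional_info first_name last_name (get_professional_info first_name last_name)

-- ===== LEMMAS AND PROOFS =====

-- flattened (name, value) pair list of a team list, in A's scan priority order
def pvFlat (ts : List (String × String × List String)) : List (String × (Option String × Option String)) :=
  ts.flatMap (fun t =>
    let label := (pvSpecMap.get? t.1).getD ""
    (PySem.Str.lower t.2.1, (some label, some "team_leader")) ::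
      t.2.2.map (fun m => (PySem.Str.lower m, (some label, some "professionista"))))

theorem pv_lookup_map_const {α : Type} (f : α → String) (v : Option String × Option String)
    (full : String) (ms : List α) :
    (ms.map (fun m => (f m, v))).lookup full
      = if ms.any (fun m => f m == full) then some v else none := by
  induction ms with
  | nil => simp
  | cons m rest ih =>
    simp only [List.map_cons, List.lookup_cons, List.any_cons]
    by_cases h : f m = full
    · simp [h]
    · have h1 : (full == f m) = false := by simp [Ne.symm h]
      have h2 : (f m == full) = false := by simp [h]
      simp [h1, h2, ih]

theorem pv_lookup_append {α β : Type} [BEq α] (k : α) (l1 l2 : List (α × β)) :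
    (l1 ++ l2).lookup k = ((l1.lookup k).or (l2.lookup k)) := by
  induction l1 with
  | nil => simp
  | cons p rest ih =>
    rcases p with ⟨a, b⟩
    by_cases h : (k == a) = true
    · simp [List.lookup_cons, h]
    · simp [List.lookup_cons, h, ih]

theorem pv_scanA_eq_lookup (full : String) (ts : List (String × String × List String)) :
    pvScanA full ts = ((pvFlat ts).lookup full).getD (none, none) := by
  induction ts with
  | nil => simp [pvScanA, pvFlat]
  | cons t rest ih =>
    rcases t with ⟨tt, leader, members⟩
    simp only [pvScanA, pvFlat, List.flatMap_cons, pv_lookup_append, List.lookup_cons]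
    by_cases hl : PySem.Str.lower leader = full
    · simp [hl]
    · have h1 : (full == PySem.Str.lower leader) = false := by simp [Ne.symm hl]
      have h2 : (PySem.Str.lower leader == full) = false := by simp [hl]
      rw [pv_lookup_map_const (fun m => PySem.Str.lower m)]
      by_cases hm : members.any (fun m => PySem.Str.lower m == full) = true
      · simp [h1, h2, hm]
      · simp only [h1, h2, Bool.not_eq_true] at *
        simp [hm, ih, pvFlat]

-- a Dict literal looks up its pair list first-match
theorem pv_get?_mk_eq_lookup {β : Type} (l : List (String × β)) (k : String) :
    (PySem.Dict.mk l).get? k = l.lookup k := by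
  induction l with
  | nil => rfl
  | cons p rest ih =>
    rcases p with ⟨a, v⟩
    rw [PySem.Dict.get?_mk_cons, List.lookup_cons]
    by_cases h : a = k
    · simp [h]
    · have hk : (k == a) = false := by simp [Ne.symm h]
      simp [h, hk, ih]

-- keep the first occurrence of each key; lookup is unchanged
def pvDedup {β : Type} (seen : List String) : List (String × β) → List (String × β)
  | [] => []
  | p :: rest => if p.1 ∈ seen then pvDedup seen rest else p :: pvDedup (p.1 :: seen) rest

theorem pv_lookup_pvDedup {β : Type} (l : List (String × β)) (seen : List String) (k : String)
    (hk : k ∉ seen) : (pvDedup seen l).lookup k = l.lookup k := by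
  induction l generalizing seen with
  | nil => rfl
  | cons p rest ih =>
    rcases p with ⟨a, v⟩
    simp only [pvDedup]
    by_cases hs : a ∈ seen
    · have hne : (k == a) = false := by
        simp only [beq_eq_false_iff_ne]; rintro rfl; exact hk hs
      simp [hs, ih seen hk, List.lookup_cons, hne]
    · by_cases h : k = a
      · simp [hs, h]
      · have hne : (k == a) = false := by simp [h]
        have : k ∉ a :: seen := by simp [h, hk]
        simp [hs, List.lookup_cons, hne, ih _ this]

theorem pv_lookup_map_snd {β γ : Type} (f : β → γ) (l : List (String × β)) (k : String) :
    (l.map (fun p => (p.1, f p.2))).lookup k = (l.lookup k).map f := by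
  induction l with
  | nil => rfl
  | cons p rest ih =>
    rcases p with ⟨a, v⟩
    by_cases h : (k == a) = true
    · simp [List.lookup_cons, h]
    · simp [List.lookup_cons, h, ih]

-- the deduped scan list IS Source B's table (with the string pairs wrapped as options)
set_option maxRecDepth 8192 in
theorem pv_dedup_flat_eq :
    pvDedup [] (pvFlat pvTeams)
      = pvNameIndex.items.map (fun p => (p.1, (some p.2.1, some p.2.2))) := by decide

set_option maxRecDepth 8192 in
theorem pv_flat_lookup_eq (k : String) :
    (pvFlat pvTeams).lookup k
      = (pvNameIndex.get? k).map (fun p => (some p.1, some p.2)) := by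
  have h1 := pv_lookup_pvDedup (pvFlat pvTeams) [] k (by simp)
  have h2 : pvNameIndex = PySem.Dict.mk pvNameIndex.items := rfl
  rw [← h1, pv_dedup_flat_eq, h2, pv_get?_mk_eq_lookup,
    pv_lookup_map_snd (fun p => (some p.1, some p.2)) pvNameIndex.items k]

-- ===== VERDICT =====
theorem get_professional_info_spec : Claim_equal_get_professional_info := by
  intro fn ln _
  unfold Spec_get_professional_info get_professional_info get_professional_info_alt
  rw [pv_scanA_eq_lookup, pv_flat_lookup_eq]
  cases pvNameIndex.get? (PySem.Str.lower (PySem.Str.strip (fn ++ " " ++ ln))) with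
  | none => rfl
  | some p => rfl
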